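-- pv_equiv track=rewrite | github.com/SCLemon/CPE_package | 必考 49 題/必考 49 題 Python 參考答案一/11063.py | solve
-- ===== SOURCE A (Python) =====
-- def solve(n, nums):
--     for i in range(1, n):
--         if nums[i] < 1 or nums[i-1] < 1: return 'It is not a B2-Sequence.'
--         if nums[i-1] >= nums[i]: return 'It is not a B2-Sequence.'
--
--     seen = []
--     for i in range(n):
--         for j in range(i, n):
--             if nums[i] + nums[j] in seen: return 'It is not a B2-Sequence.'
--             seen.append(nums[i] + nums[j])
--     return 'It is a B2-Sequence.'
-- ===== SOURCE B (Python) =====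
-- def solve(n, nums):
--     prefix = nums[:n] if n > 0 else []
--     for prev, cur in zip(prefix, prefix[1:]):
--         if prev < 1 or cur < 1 or prev >= cur:
--             return 'It is not a B2-Sequence.'
--     sums = sorted(x + y for k, x in enumerate(prefix) for y in prefix[k:])
--     for a, b in zip(sums, sums[1:]):
--         if a == b:
--             return 'It is not a B2-Sequence.'
--     return 'It is a B2-Sequence.'
-- ===== Notes on version B (the rewrite author's own statement) =====
-- stated objective: alternative
-- what changed: replaces the quadratic seen-list with its incremental 'sum in seen' membership scan by building the pairwise-sum list once, sorting it and scanning for one adjacent equal pair; the guard loop becomes a zip over adjacent pairs of the prefix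
import Mathlib
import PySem

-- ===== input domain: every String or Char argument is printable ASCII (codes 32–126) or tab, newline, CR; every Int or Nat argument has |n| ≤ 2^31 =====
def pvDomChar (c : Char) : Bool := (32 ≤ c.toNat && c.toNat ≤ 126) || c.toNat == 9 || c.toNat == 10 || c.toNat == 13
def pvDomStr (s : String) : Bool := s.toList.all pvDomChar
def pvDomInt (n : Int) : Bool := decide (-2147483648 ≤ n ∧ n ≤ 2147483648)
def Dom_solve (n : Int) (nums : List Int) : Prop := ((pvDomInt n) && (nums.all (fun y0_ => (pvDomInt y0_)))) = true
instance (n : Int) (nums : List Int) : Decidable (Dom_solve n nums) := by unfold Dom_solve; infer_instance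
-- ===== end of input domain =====

-- B replaces A's incremental 'sum in seen' membership scan by sorting the pairwise-sum list once and
-- scanning for an adjacent equal pair (objective: alternative).

-- ===== PORT A =====
-- 'for i in range(1, n)' ported as a fuel recursion of (n-1).toNat steps carrying the index i;
-- nums[i] is PySem.List.pyGetD (in range on every input Pre_solve admits up to an early return).
def solveGuardA (nums : List Int) : Nat → Int → Bool
  | 0, _ => false
  | f+1, i =>
    if PySem.List.pyGetD nums i 0 < 1 || PySem.List.pyGetD nums (i-1) 0 < 1 then true
    else if PySem.List.pyGetD nums (i-1) 0 ≥ PySem.List.pyGetD nums i 0 then true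
    else solveGuardA nums f (i+1)

-- inner loop 'for j in range(i, n)': none = the early 'return' (duplicate sum), some = the grown seen
def solveInnerA (nums : List Int) (i : Int) : List Int → List Int → Option (List Int)
  | seen, [] => some seen
  | seen, j :: js =>
    if seen.contains (PySem.List.pyGetD nums i 0 + PySem.List.pyGetD nums j 0) then none
    else solveInnerA nums i (seen ++ [PySem.List.pyGetD nums i 0 + PySem.List.pyGetD nums j 0]) js

-- outer loop 'for i in range(n)'
def solveOuterA (nums : List Int) (n : Int) : List Int → List Int → Bool
  | _, [] => false
  | seen, i :: is =>
    match solveInnerA nums i seen (PySem.List.pyRange i n 1) with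
    | none => true
    | some seen' => solveOuterA nums n seen' is

def solve (n : Int) (nums : List Int) : String :=
  if solveGuardA nums (n - 1).toNat 1 then "It is not a B2-Sequence."
  else if solveOuterA nums n [] (PySem.List.pyRange 0 n 1) then "It is not a B2-Sequence."
  else "It is a B2-Sequence."

-- ===== PORT B =====
def solve_alt (n : Int) (nums : List Int) : String :=
  let pre := if n > 0 then PySem.List.slice nums none (some n) else []
  if (pre.zip (PySem.List.slice pre (some 1) none)).any
      (fun p => p.1 < 1 || p.2 < 1 || p.1 ≥ p.2) then "It is not a B2-Sequence."
  else
    let sums := PySem.List.sorted ((PySem.List.enumerate pre).flatMap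
      (fun kx => (PySem.List.slice pre (some kx.1) none).map (fun y => kx.2 + y))) (fun x => x) false
    if (sums.zip (PySem.List.slice sums (some 1) none)).any (fun p => p.1 == p.2) then
      "It is not a B2-Sequence."
    else "It is a B2-Sequence."

-- ===== PRECONDITION & SPEC =====
-- Pre_solve is exactly where the Python A returns: when n exceeds len(nums) and no adjacent pair of
-- nums violates the positive-strictly-increasing guard, A raises IndexError; those inputs are excluded.
def Pre_solve (n : Int) (nums : List Int) : Prop :=
  n ≤ (nums.length : Int) ∨ ∃ p ∈ nums.zip nums.tail, (p.1 < 1 ∨ p.2 < 1 ∨ p.2 ≤ p.1)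
instance (n : Int) (nums : List Int) : Decidable (Pre_solve n nums) := by
  unfold Pre_solve; infer_instance

def pvWitness_solve : Int × List Int := (3, [1, 2, 5])

def Spec_solve (n : Int) (nums : List Int) (out : String) : Prop := out = solve_alt n nums
instance (n : Int) (nums : List Int) (out : String) : Decidable (Spec_solve n nums out) := by
  unfold Spec_solve; infer_instance

-- ===== CLAIM (what is proved, stated in full; the proofs are below) =====
def Claim_equal_solve : Prop := ∀ (n : Int) (nums : List Int), Dom_solve n nums → Pre_solve n nums → Spec_solve n nums (solve n nums)

-- ===== LEMMAS AND PROOFS =====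

-- the guard's violation condition at an adjacent pair (prev, cur)
def pvViolP (a b : Int) : Prop := a < 1 ∨ b < 1 ∨ b ≤ a

-- A's guard violation at index x (cur = nums[x], prev = nums[x-1])
def pvVio (nums : List Int) (x : Int) : Prop :=
  PySem.List.pyGetD nums x 0 < 1 ∨ PySem.List.pyGetD nums (x-1) 0 < 1 ∨
    PySem.List.pyGetD nums x 0 ≤ PySem.List.pyGetD nums (x-1) 0

theorem guardA_iff (nums : List Int) (f : Nat) : ∀ i : Int,
    solveGuardA nums f i = true ↔ ∃ k : Nat, k < f ∧ pvVio nums (i + k) := by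
  induction f with
  | zero => intro i; simp [solveGuardA]
  | succ f ih =>
    intro i
    rw [solveGuardA]
    by_cases h : pvVio nums i
    · have : (if PySem.List.pyGetD nums i 0 < 1 || PySem.List.pyGetD nums (i-1) 0 < 1 then true
        else if PySem.List.pyGetD nums (i-1) 0 ≥ PySem.List.pyGetD nums i 0 then true
        else solveGuardA nums f (i+1)) = true := by
        rcases h with h | h | h <;> split_ifs <;> simp_all
      rw [this]
      simp only [true_iff]
      exact ⟨0, by omega, by simpa using h⟩
    · have hc1 : ¬ (PySem.List.pyGetD nums i 0 < 1 || PySem.List.pyGetD nums (i-1) 0 < 1) = true := by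
        simp only [pvVio, not_or] at h; simp [h.1, h.2.1]
      have hc2 : ¬ (PySem.List.pyGetD nums (i-1) 0 ≥ PySem.List.pyGetD nums i 0) := by
        simp only [pvVio, not_or] at h; simpa using h.2.2
      rw [if_neg hc1, if_neg hc2, ih]
      constructor
      · rintro ⟨k, hk, hv⟩
        exact ⟨k+1, by omega, by rwa [show i + (↑(k+1) : Int) = i + 1 + k by push_cast; ring]⟩
      · rintro ⟨k, hk, hv⟩
        match k with
        | 0 => exact absurd (by simpa using hv) h
        | k+1 => exact ⟨k, by omega, by rwa [show i + 1 + (k : Int) = i + ↑(k+1) by push_cast; ring]⟩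

-- A's guard, as a statement about adjacent entries (pyGetD ↑k = getD k unconditionally)
theorem guardA_iff' (nums : List Int) (n : Int) (hn0 : 0 < n) :
    solveGuardA nums (n - 1).toNat 1 = true ↔
      ∃ k : Nat, k + 1 < n.toNat ∧ pvViolP (nums.getD k 0) (nums.getD (k+1) 0) := by
  rw [guardA_iff]
  constructor
  · rintro ⟨k, hk, hv⟩
    refine ⟨k, by omega, ?_⟩
    rw [pvVio, show (1 : Int) + (k : Int) = ((k+1 : Nat) : Int) by push_cast; ring] at hv
    simp only [PySem.List.pyGetD_natCast, show ((k+1 : Nat) : Int) - 1 = ((k : Nat) : Int) by push_cast; ring] at hv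
    rw [pvViolP]
    tauto
  · rintro ⟨k, hk, hv⟩
    refine ⟨k, by omega, ?_⟩
    rw [pvVio, show (1 : Int) + (k : Int) = ((k+1 : Nat) : Int) by push_cast; ring]
    simp only [PySem.List.pyGetD_natCast, show ((k+1 : Nat) : Int) - 1 = ((k : Nat) : Int) by push_cast; ring]
    rw [pvViolP] at hv
    tauto

theorem slice_one_tail {α : Type} (xs : List α) : PySem.List.slice xs (some 1) none = xs.tail := by
  have h : (1 : Int) = ((1 : Nat) : Int) := by norm_num
  rw [h, PySem.List.slice_from_natCast]
  simp

theorem mem_zip_tail {α : Type} {l : List α} {p : α × α} :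
    p ∈ l.zip l.tail ↔ ∃ (k : Nat) (h : k + 1 < l.length), p = (l[k], l[k+1]) := by
  rw [List.mem_iff_getElem]
  constructor
  · rintro ⟨k, hk, rfl⟩
    have hlen : (l.zip l.tail).length = l.length - 1 := by
      simp [List.length_zip, List.length_tail]
    refine ⟨k, by omega, ?_⟩
    rw [List.getElem_zip]
    congr 1
    rw [List.getElem_tail]
  · rintro ⟨k, hk, rfl⟩
    have hlen : (l.zip l.tail).length = l.length - 1 := by
      simp [List.length_zip, List.length_tail]
    refine ⟨k, by omega, ?_⟩
    rw [List.getElem_zip]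
    congr 1
    rw [List.getElem_tail]

-- B's guard, same shape
theorem guardB_iff (pre : List Int) :
    ((pre.zip (PySem.List.slice pre (some 1) none)).any
        (fun p => p.1 < 1 || p.2 < 1 || p.1 ≥ p.2)) = true ↔
      ∃ k : Nat, k + 1 < pre.length ∧ pvViolP (pre.getD k 0) (pre.getD (k+1) 0) := by
  rw [slice_one_tail, List.any_eq_true]
  constructor
  · rintro ⟨p, hp, hc⟩
    obtain ⟨k, h, rfl⟩ := mem_zip_tail.mp hp
    refine ⟨k, h, ?_⟩
    rw [List.getD_eq_getElem _ _ (by omega), List.getD_eq_getElem _ _ (by omega), pvViolP]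
    simp [ge_iff_le] at hc
    tauto
  · rintro ⟨k, h, hv⟩
    rw [List.getD_eq_getElem _ _ (by omega), List.getD_eq_getElem _ _ (by omega), pvViolP] at hv
    refine ⟨(pre[k], pre[k+1]), mem_zip_tail.mpr ⟨k, h, rfl⟩, ?_⟩
    simp [ge_iff_le]
    tauto

def scanDup (seen : List Int) : List Int → Bool
  | [] => false
  | x :: xs => if seen.contains x then true else scanDup (seen ++ [x]) xs

theorem innerA_eq (nums : List Int) (i : Int) (js : List Int) : ∀ seen,
    solveInnerA nums i seen js =
      if scanDup seen (js.map fun j => PySem.List.pyGetD nums i 0 + PySem.List.pyGetD nums j 0) then none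
      else some (seen ++ js.map fun j => PySem.List.pyGetD nums i 0 + PySem.List.pyGetD nums j 0) := by
  induction js with
  | nil => intro seen; simp [solveInnerA, scanDup]
  | cons j js ih =>
    intro seen
    rw [solveInnerA, List.map_cons, scanDup]
    by_cases h : PySem.List.pyGetD nums i 0 + PySem.List.pyGetD nums j 0 ∈ seen
    · simp [h]
    · simp only [List.contains_eq_mem, h, decide_false, Bool.false_eq_true, if_false, ih]
      split_ifs <;> first | rfl | simp

theorem scanDup_append (L1 : List Int) : ∀ (seen L2 : List Int),
    scanDup seen (L1 ++ L2) = if scanDup seen L1 then true else scanDup (seen ++ L1) L2 := by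
  induction L1 with
  | nil => intro seen L2; simp [scanDup]
  | cons x L1 ih =>
    intro seen L2
    rw [List.cons_append, scanDup, scanDup]
    by_cases h : x ∈ seen
    · simp [h]
    · simp only [List.contains_eq_mem, h, decide_false, Bool.false_eq_true, if_false, ih,
        List.append_assoc, List.singleton_append]

theorem outerA_eq (nums : List Int) (n : Int) (is : List Int) : ∀ seen,
    solveOuterA nums n seen is =
      scanDup seen (is.flatMap fun i => (PySem.List.pyRange i n 1).map
        (fun j => PySem.List.pyGetD nums i 0 + PySem.List.pyGetD nums j 0)) := by
  induction is with
  | nil => intro seen; simp [solveOuterA, scanDup]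
  | cons i is ih =>
    intro seen
    rw [solveOuterA, innerA_eq, List.flatMap_cons, scanDup_append]
    split_ifs with h
    · simp
    · simp [ih]

theorem scanDup_iff (L : List Int) : ∀ seen,
    scanDup seen L = true ↔ ¬ (L.Nodup ∧ ∀ x ∈ L, x ∉ seen) := by
  induction L with
  | nil => intro seen; simp [scanDup]
  | cons x L ih =>
    intro seen
    rw [scanDup]
    by_cases h : x ∈ seen
    · simp only [List.contains_eq_mem, h, decide_true, if_true, true_iff]
      intro ⟨_, hall⟩
      exact hall x (by simp) h
    · simp only [List.contains_eq_mem, h, decide_false, Bool.false_eq_true, if_false, ih, List.nodup_cons]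
      constructor
      · intro hn ⟨⟨hxL, hnd⟩, hall⟩
        apply hn
        refine ⟨hnd, fun y hy => ?_⟩
        simp only [List.mem_append, List.mem_singleton, not_or]
        exact ⟨hall y (by simp [hy]), fun he => hxL (he ▸ hy)⟩
      · intro hn ⟨hnd, hall⟩
        apply hn
        have hxL : x ∉ L := fun hxL => by
          have := hall x hxL
          simp at this
        refine ⟨⟨hxL, hnd⟩, fun y hy => ?_⟩
        rcases List.mem_cons.mp hy with rfl | hy'
        · exact h
        · have := hall y hy'
          simp only [List.mem_append, List.mem_singleton, not_or] at this
          exact this.1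

theorem scanDup_nil_iff (L : List Int) : scanDup [] L = true ↔ ¬ L.Nodup := by
  rw [scanDup_iff]; simp

theorem anyAdj_iff (S : List Int) (hp : S.Pairwise (· ≤ ·)) :
    ((S.zip S.tail).any fun p => p.1 == p.2) = true ↔ ¬ S.Nodup := by
  induction S with
  | nil => simp
  | cons a S ih =>
    match S with
    | [] => simp
    | b :: r =>
      have hab : a ≤ b := (List.pairwise_cons.mp hp).1 b (by simp)
      have hp' : (b :: r).Pairwise (· ≤ ·) := (List.pairwise_cons.mp hp).2
      have hbr : ∀ y ∈ r, b ≤ y := (List.pairwise_cons.mp hp').1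
      by_cases he : a = b
      · subst he
        simp only [List.tail_cons, List.zip_cons_cons, List.any_cons, beq_self_eq_true,
          Bool.true_or, true_iff]
        simp [List.nodup_cons]
      · have step : ((a :: b :: r).zip (a :: b :: r).tail).any (fun p => p.1 == p.2) =
            ((b :: r).zip (b :: r).tail).any (fun p => p.1 == p.2) := by
          simp [he]
        rw [step, ih hp']
        have haS : a ∉ b :: r := by
          intro hmem
          rcases List.mem_cons.mp hmem with rfl | hr
          · exact he rfl
          · exact he (le_antisymm hab (hbr a hr))
        constructor
        · intro hn hnd
          exact hn (List.nodup_cons.mp hnd).2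
        · intro hn hnd
          exact hn (List.nodup_cons.mpr ⟨haS, hnd⟩)

theorem anyAdj_sorted_iff (L : List Int) :
    (((PySem.List.sorted L (fun x => x) false).zip
        (PySem.List.sorted L (fun x => x) false).tail).any fun p => p.1 == p.2) = true ↔
      ¬ L.Nodup := by
  rw [anyAdj_iff _ (by simpa using PySem.List.sorted_pairwise L (fun x => x))]
  rw [List.Perm.nodup_iff (PySem.List.sorted_perm L (fun x => x) false)]

theorem pre_eq_take (nums : List Int) (n : Int) (hn : 0 ≤ n) :
    PySem.List.slice nums none (some n) = nums.take n.toNat := by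
  rw [show n = ((n.toNat : Nat) : Int) from (Int.toNat_of_nonneg hn).symm,
    PySem.List.slice_to_natCast]
  simp
  omega

theorem inner_seg_eq (nums : List Int) (n : Int) (m : Nat) (hn : n ≤ (nums.length : Int))
    (hin : (m : Int) < n) :
    ((PySem.List.slice (nums.take n.toNat) (some (m : Int)) none).map
        (fun y => PySem.List.pyGetD (nums.take n.toNat) (m : Int) 0 + y)) =
      (PySem.List.pyRange (m : Int) n 1).map
        (fun j => PySem.List.pyGetD nums (m : Int) 0 + PySem.List.pyGetD nums j 0) := by
  have hlen : (nums.take n.toNat).length = n.toNat := by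
    rw [List.length_take]; omega
  have hx : PySem.List.pyGetD (nums.take n.toNat) (m : Int) 0 = PySem.List.pyGetD nums (m : Int) 0 := by
    rw [PySem.List.pyGetD_eq_getElem _ _ (by positivity) (by omega),
      PySem.List.pyGetD_eq_getElem _ _ (by positivity) (by omega)]
    exact List.getElem_take
  rw [PySem.List.slice_from_natCast, PySem.List.pyRange_one]
  apply List.ext_getElem
  · simp; omega
  · intro k h1 h2
    simp only [List.getElem_map, List.getElem_drop, List.getElem_range]
    simp only [hx]
    congr 1
    have hk : m + k < n.toNat := by
      simp only [List.length_map, List.length_drop, hlen] at h1; omega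
    rw [List.getElem_take]
    conv_rhs => rw [PySem.List.pyGetD_eq_getElem _ _ (by positivity) (by push_cast; omega)]
    have ht : ((m : Int) + (k : Int)).toNat = m + k := by omega
    simp [ht]

-- B's pairwise-sum list equals A's (the same i-then-j-from-i traversal)
theorem sums_eq (nums : List Int) (n : Int) (hn0 : 0 < n) (hnl : n ≤ (nums.length : Int)) :
    ((PySem.List.enumerate (nums.take n.toNat)).flatMap
        (fun kx => (PySem.List.slice (nums.take n.toNat) (some kx.1) none).map (fun y => kx.2 + y))) =
      ((PySem.List.pyRange 0 n 1).flatMap (fun i => (PySem.List.pyRange i n 1).map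
        (fun j => PySem.List.pyGetD nums i 0 + PySem.List.pyGetD nums j 0))) := by
  rw [PySem.List.enumerate_eq_map_pyRange _ 0, List.flatMap_map]
  have hlen : PySem.List.len (nums.take n.toNat) = n := by
    simp [PySem.List.len, List.length_take]
    omega
  rw [hlen]
  apply List.flatMap_congr
  intro i hi
  have hmem := PySem.List.mem_pyRange_one.mp hi
  obtain ⟨m, rfl⟩ : ∃ m : Nat, i = (m : Int) := ⟨i.toNat, (Int.toNat_of_nonneg hmem.1).symm⟩
  exact inner_seg_eq nums n m hnl hmem.2

-- ===== VERDICT (by name: the statement is the Claim_ definition above) =====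
theorem solve_spec : Claim_equal_solve := by
  intro n nums _ hpre
  unfold Spec_solve
  simp only [solve, solve_alt]
  by_cases hn0 : 0 < n
  · rw [if_pos (show n > 0 from hn0), pre_eq_take nums n (le_of_lt hn0)]
    by_cases hnl : n ≤ (nums.length : Int)
    · -- guards agree
      have hpreLen : (nums.take n.toNat).length = n.toNat := by
        rw [List.length_take]; omega
      have hgetD : ∀ k : Nat, k < n.toNat → (nums.take n.toNat).getD k 0 = nums.getD k 0 := by
        intro k hk
        rw [List.getD_eq_getElem _ _ (by omega), List.getD_eq_getElem _ _ (by omega)]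
        exact List.getElem_take
      have hguards : solveGuardA nums (n - 1).toNat 1 =
          ((nums.take n.toNat).zip (PySem.List.slice (nums.take n.toNat) (some 1) none)).any
            (fun p => p.1 < 1 || p.2 < 1 || p.1 ≥ p.2) := by
        apply Bool.coe_iff_coe.mp
        rw [guardA_iff' nums n hn0, guardB_iff]
        constructor
        · rintro ⟨k, hk, hv⟩
          refine ⟨k, by omega, ?_⟩
          rw [hgetD k (by omega), hgetD (k+1) (by omega)]
          exact hv
        · rintro ⟨k, hk, hv⟩
          rw [hgetD k (by omega), hgetD (k+1) (by omega)] at hv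
          exact ⟨k, by omega, hv⟩
      rw [← hguards]
      by_cases hg : solveGuardA nums (n - 1).toNat 1 = true
      · rw [if_pos hg, if_pos hg]
      · rw [if_neg hg, if_neg hg]
        have hphase2 : solveOuterA nums n [] (PySem.List.pyRange 0 n 1) =
            (((PySem.List.sorted ((PySem.List.enumerate (nums.take n.toNat)).flatMap
                (fun kx => (PySem.List.slice (nums.take n.toNat) (some kx.1) none).map
                  (fun y => kx.2 + y))) (fun x => x) false).zip
              (PySem.List.slice (PySem.List.sorted ((PySem.List.enumerate (nums.take n.toNat)).flatMap
                (fun kx => (PySem.List.slice (nums.take n.toNat) (some kx.1) none).map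
                  (fun y => kx.2 + y))) (fun x => x) false) (some 1) none)).any
              (fun p => p.1 == p.2)) := by
          apply Bool.coe_iff_coe.mp
          rw [outerA_eq, scanDup_nil_iff, slice_one_tail, anyAdj_sorted_iff,
            sums_eq nums n hn0 hnl]
        rw [hphase2]
    · -- n exceeds the length: Pre_solve supplies a violating adjacent pair; both guards fire
      have hviol : ∃ k : Nat, k + 1 < nums.length ∧
          pvViolP (nums.getD k 0) (nums.getD (k+1) 0) := by
        rcases hpre with h | ⟨p, hp, hc⟩
        · omega
        · obtain ⟨k, h, rfl⟩ := mem_zip_tail.mp hp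
          refine ⟨k, h, ?_⟩
          rw [List.getD_eq_getElem _ _ (by omega), List.getD_eq_getElem _ _ (by omega), pvViolP]
          exact hc
      obtain ⟨k, hk, hv⟩ := hviol
      have htake : nums.take n.toNat = nums := List.take_of_length_le (by omega)
      rw [htake]
      have hgA : solveGuardA nums (n - 1).toNat 1 = true := by
        rw [guardA_iff' nums n hn0]
        exact ⟨k, by omega, hv⟩
      have hgB : ((nums.zip (PySem.List.slice nums (some 1) none)).any
          (fun p => p.1 < 1 || p.2 < 1 || p.1 ≥ p.2)) = true := by
        rw [guardB_iff]
        exact ⟨k, by omega, hv⟩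
      rw [if_pos hgA, if_pos hgB]
  · -- n ≤ 0: both loops are empty on each side
    rw [if_neg (show ¬ n > 0 from hn0),
      show (n - 1).toNat = 0 from by omega,
      PySem.List.pyRange_one_eq_nil (by omega)]
    simp [solveGuardA, solveOuterA, slice_one_tail, PySem.List.enumerate, PySem.List.sorted]
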